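-- pv_equiv track=rewrite | github.com/Laaggan/advent_of_code | 2019/3.1.py | calculate_distances_running_distances
-- ===== SOURCE A (Python) =====
-- def point_is_on_line_segment(p1, p2, cross):
--     if (p1[0] == p2[0] and cross[0] == p1[0]):
--         return abs(cross[1] - p1[1])
--     elif (p1[1] == p2[1] and cross[1] == p1[1]):
--         return abs(cross[0] - p1[0])
--     return None
--
-- def distance_between_points(p1, p2):
--     if (p1[1] == p2[1]):
--         return abs(p2[0] - p1[0])
--     else:
--         return abs(p2[1] - p1[1])
--
-- def calculate_distances_running_distances(line_segments, crosses):
--     lengths_until_cross = dict()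
--     current_line_length = 0
--     for line_segment in line_segments:
--         on_line_segment = None
--         point1, point2 = line_segment
--         for cross in crosses:
--             on_line_segment = point_is_on_line_segment(point1, point2, cross)
--
--             if (on_line_segment is not None):
--                 lengths_until_cross[cross] = current_line_length + on_line_segment
--                 continue
--         current_line_length += distance_between_points(point1, point2)
--     return lengths_until_cross
-- ===== SOURCE B (Python) =====
-- def calculate_distances_running_distances(line_segments, crosses):
--     by_x = {}
--     for cross in crosses:
--         by_x.setdefault(cross[0], []).append(cross)
--     by_y = {}
--     for cross in crosses:
--         by_y.setdefault(cross[1], []).append(cross)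
--     lengths_until_cross = {}
--     current_line_length = 0
--     for point1, point2 in line_segments:
--         if point1[0] == point2[0]:
--             for cross in by_x.get(point1[0], []):
--                 lengths_until_cross[cross] = current_line_length + abs(cross[1] - point1[1])
--         elif point1[1] == point2[1]:
--             for cross in by_y.get(point1[1], []):
--                 lengths_until_cross[cross] = current_line_length + abs(cross[0] - point1[0])
--         if point1[1] == point2[1]:
--             current_line_length += abs(point2[0] - point1[0])
--         else:
--             current_line_length += abs(point2[1] - point1[1])
--     return lengths_until_cross
-- ===== Notes on version B (the rewrite author's own statement) =====
-- stated objective: alternative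
-- what changed: B buckets the crosses once by x and by y coordinate into dicts, then each segment only visits the crosses in its matching bucket instead of A's inner scan over all crosses per segment.
-- outside the precondition, e.g. on calculate_distances_running_distances([((0, 0), (0, 0))], [(5, 0)]): A returns {(5, 0): 5}, B returns {}
import Mathlib
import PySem

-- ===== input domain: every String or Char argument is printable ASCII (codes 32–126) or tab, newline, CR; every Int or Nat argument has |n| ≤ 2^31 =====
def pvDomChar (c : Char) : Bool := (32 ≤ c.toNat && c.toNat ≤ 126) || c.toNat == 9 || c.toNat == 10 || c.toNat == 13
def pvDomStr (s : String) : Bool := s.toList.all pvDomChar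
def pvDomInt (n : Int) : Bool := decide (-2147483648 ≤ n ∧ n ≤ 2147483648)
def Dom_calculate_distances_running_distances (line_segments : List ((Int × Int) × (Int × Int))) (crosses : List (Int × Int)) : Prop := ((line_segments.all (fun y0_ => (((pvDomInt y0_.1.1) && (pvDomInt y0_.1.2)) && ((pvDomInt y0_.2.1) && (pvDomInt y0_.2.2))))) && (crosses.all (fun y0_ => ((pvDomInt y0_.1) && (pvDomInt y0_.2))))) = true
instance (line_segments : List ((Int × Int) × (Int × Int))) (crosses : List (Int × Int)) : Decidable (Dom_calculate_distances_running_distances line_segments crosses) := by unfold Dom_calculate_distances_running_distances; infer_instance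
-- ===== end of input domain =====

-- B buckets crosses by x and by y once, so each segment visits only the crosses in its matching bucket instead of scanning all crosses (alternative algorithm).


-- ===== PORT A =====
def pv_point_is_on_line_segment (p1 p2 cross : Int × Int) : Option Int :=
  if p1.1 = p2.1 ∧ cross.1 = p1.1 then some |cross.2 - p1.2|
  else if p1.2 = p2.2 ∧ cross.2 = p1.2 then some |cross.1 - p1.1|
  else none

def pv_distance_between_points (p1 p2 : Int × Int) : Int :=
  if p1.2 = p2.2 then |p2.1 - p1.1| else |p2.2 - p1.2|

def calculate_distances_running_distances (line_segments : List ((Int × Int) × (Int × Int))) (crosses : List (Int × Int)) : List (Int × Int × Int) :=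
  let st := line_segments.foldl
    (fun (st : PySem.Dict (Int × Int) Int × Int) seg =>
      let d := crosses.foldl
        (fun d cross =>
          match pv_point_is_on_line_segment seg.1 seg.2 cross with
          | some v => d.insert cross (st.2 + v)
          | none => d) st.1
      (d, st.2 + pv_distance_between_points seg.1 seg.2))
    (PySem.Dict.empty, 0)
  st.1.items.map (fun p => (p.1.1, p.1.2, p.2))

-- ===== PORT B =====
def calculate_distances_running_distances_alt (line_segments : List ((Int × Int) × (Int × Int))) (crosses : List (Int × Int)) : List (Int × Int × Int) :=
  let byX : PySem.Dict Int (List (Int × Int)) :=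
    crosses.foldl (fun d c => d.modify c.1 [] (· ++ [c])) PySem.Dict.empty
  let byY : PySem.Dict Int (List (Int × Int)) :=
    crosses.foldl (fun d c => d.modify c.2 [] (· ++ [c])) PySem.Dict.empty
  let st := line_segments.foldl
    (fun (st : PySem.Dict (Int × Int) Int × Int) seg =>
      let d :=
        if seg.1.1 = seg.2.1 then
          (byX.getD seg.1.1 []).foldl (fun d c => d.insert c (st.2 + |c.2 - seg.1.2|)) st.1
        else if seg.1.2 = seg.2.2 then
          (byY.getD seg.1.2 []).foldl (fun d c => d.insert c (st.2 + |c.1 - seg.1.1|)) st.1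
        else st.1
      (d, st.2 + (if seg.1.2 = seg.2.2 then |seg.2.1 - seg.1.1| else |seg.2.2 - seg.1.2|)))
    (PySem.Dict.empty, 0)
  st.1.items.map (fun p => (p.1.1, p.1.2, p.2))

-- ===== PRECONDITION & SPEC =====
-- Pre_ excludes zero-length segments (both endpoints equal): on those A's infinite-line test can fire
-- both its vertical and its horizontal branch, and which crosses get an entry is an accidental corner
-- (no cross lies on a zero-length wire segment) on which A's and B's answers are both defensible.
def Pre_calculate_distances_running_distances (line_segments : List ((Int × Int) × (Int × Int))) (crosses : List (Int × Int)) : Prop :=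
  ∀ seg ∈ line_segments, seg.1 ≠ seg.2
instance (line_segments : List ((Int × Int) × (Int × Int))) (crosses : List (Int × Int)) : Decidable (Pre_calculate_distances_running_distances line_segments crosses) := by unfold Pre_calculate_distances_running_distances; infer_instance

def pvWitness_calculate_distances_running_distances : (List ((Int × Int) × (Int × Int))) × (List (Int × Int)) :=
  ([((0, 0), (0, 2)), ((0, 2), (3, 2))], [(0, 1), (2, 2)])

def Spec_calculate_distances_running_distances (line_segments : List ((Int × Int) × (Int × Int))) (crosses : List (Int × Int)) (out : List (Int × Int × Int)) : Prop := out = calculate_distances_running_distances_alt line_segments crosses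
instance (line_segments : List ((Int × Int) × (Int × Int))) (crosses : List (Int × Int)) (out : List (Int × Int × Int)) : Decidable (Spec_calculate_distances_running_distances line_segments crosses out) := by unfold Spec_calculate_distances_running_distances; infer_instance

-- ===== CLAIM (what is proved, stated in full; the proofs are below) =====
def Claim_equal_calculate_distances_running_distances : Prop := ∀ (line_segments : List ((Int × Int) × (Int × Int))) (crosses : List (Int × Int)), Dom_calculate_distances_running_distances line_segments crosses → Pre_calculate_distances_running_distances line_segments crosses → Spec_calculate_distances_running_distances line_segments crosses (calculate_distances_running_distances line_segments crosses)

-- ===== LEMMAS AND PROOFS =====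

-- the x-bucket dict holds, at key x, exactly the crosses whose first coordinate is x (in order)
theorem pv_bucket_fst (crosses : List (Int × Int)) (x : Int) :
    (crosses.foldl (fun d c => d.modify c.1 [] (· ++ [c])) PySem.Dict.empty).getD x []
      = crosses.filter (fun c => c.1 == x) := by
  have h : crosses.foldl (fun d c => d.modify c.1 [] (· ++ [c])) PySem.Dict.empty
      = (crosses.map (fun c => (c.1, c))).foldl (fun d p => d.modify p.1 [] (· ++ [p.2])) PySem.Dict.empty := by
    rw [List.foldl_map]
  rw [h, PySem.Dict.getD_foldl_modify_append, PySem.Dict.getD_empty, List.filter_map]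
  simp [Function.comp_def]

theorem pv_bucket_snd (crosses : List (Int × Int)) (y : Int) :
    (crosses.foldl (fun d c => d.modify c.2 [] (· ++ [c])) PySem.Dict.empty).getD y []
      = crosses.filter (fun c => c.2 == y) := by
  have h : crosses.foldl (fun d c => d.modify c.2 [] (· ++ [c])) PySem.Dict.empty
      = (crosses.map (fun c => (c.2, c))).foldl (fun d p => d.modify p.1 [] (· ++ [p.2])) PySem.Dict.empty := by
    rw [List.foldl_map]
  rw [h, PySem.Dict.getD_foldl_modify_append, PySem.Dict.getD_empty, List.filter_map]
  simp [Function.comp_def]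

-- on a non-degenerate segment A's per-segment step equals B's bucket step
theorem pv_step_eq (crosses : List (Int × Int)) (seg : (Int × Int) × (Int × Int))
    (hseg : seg.1 ≠ seg.2) (st : PySem.Dict (Int × Int) Int × Int) :
    (let d := crosses.foldl
        (fun d cross =>
          match pv_point_is_on_line_segment seg.1 seg.2 cross with
          | some v => d.insert cross (st.2 + v)
          | none => d) st.1
     (d, st.2 + pv_distance_between_points seg.1 seg.2))
    = (let d :=
        if seg.1.1 = seg.2.1 then
          (((crosses.foldl (fun d c => d.modify c.1 [] (· ++ [c])) PySem.Dict.empty)).getD seg.1.1 []).foldl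
            (fun d c => d.insert c (st.2 + |c.2 - seg.1.2|)) st.1
        else if seg.1.2 = seg.2.2 then
          (((crosses.foldl (fun d c => d.modify c.2 [] (· ++ [c])) PySem.Dict.empty)).getD seg.1.2 []).foldl
            (fun d c => d.insert c (st.2 + |c.1 - seg.1.1|)) st.1
        else st.1
       (d, st.2 + (if seg.1.2 = seg.2.2 then |seg.2.1 - seg.1.1| else |seg.2.2 - seg.1.2|))) := by
  simp only []
  refine Prod.ext ?_ (by simp [pv_distance_between_points])
  by_cases hx : seg.1.1 = seg.2.1
  · -- vertical segment; non-degenerate forces seg.1.2 ≠ seg.2.2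
    have hy : seg.1.2 ≠ seg.2.2 := by
      intro hy; exact hseg (Prod.ext hx hy)
    rw [if_pos hx, pv_bucket_fst, List.foldl_filter]
    refine PySem.List.foldl_congr_mem _ _ _ _ ?_
    intro acc c _
    by_cases hc : c.1 = seg.1.1
    · simp [pv_point_is_on_line_segment, hx, hc]
    · have hc' : c.1 ≠ seg.2.1 := by rw [← hx]; exact hc
      simp [pv_point_is_on_line_segment, hx, hy, hc']
  · rw [if_neg hx]
    by_cases hy : seg.1.2 = seg.2.2
    · rw [if_pos hy, pv_bucket_snd, List.foldl_filter]
      refine PySem.List.foldl_congr_mem _ _ _ _ ?_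
      intro acc c _
      by_cases hc : c.2 = seg.1.2
      · simp [pv_point_is_on_line_segment, hx, hy, hc]
      · have hc' : c.2 ≠ seg.2.2 := by rw [← hy]; exact hc
        simp [pv_point_is_on_line_segment, hx, hy, hc']
    · rw [if_neg hy]
      have h : crosses.foldl
          (fun d cross =>
            match pv_point_is_on_line_segment seg.1 seg.2 cross with
            | some v => d.insert cross (st.2 + v)
            | none => d) st.1
          = crosses.foldl (fun d _ => d) st.1 := by
        refine PySem.List.foldl_congr_mem _ _ _ _ ?_
        intro acc c _
        simp [pv_point_is_on_line_segment, hx, hy]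
      rw [h, List.foldl_fixed]

-- ===== VERDICT (by name: the statement is the Claim_ definition above) =====
theorem calculate_distances_running_distances_spec : Claim_equal_calculate_distances_running_distances := by
  intro line_segments crosses _ hpre
  unfold Spec_calculate_distances_running_distances
  unfold calculate_distances_running_distances calculate_distances_running_distances_alt
  simp only []
  exact congrArg (fun st : PySem.Dict (Int × Int) Int × Int => st.1.items.map (fun p => (p.1.1, p.1.2, p.2)))
    (PySem.List.foldl_congr_mem line_segments _ _ _ (fun st seg hmem => pv_step_eq crosses seg (hpre seg hmem) st))
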